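-- pv_equiv track=rewrite | github.com/AlgoZenithNITC/GFG_POTD_Solutions_AlgoZenithNITC | Find_duplicate_Rows_in_a_matrix.py | repeatedRows
-- ===== SOURCE A (Python) =====
-- def repeatedRows(arr, m ,n):
--   s = set()
--   ans = []
--   for i in range(m):
--       number = 0
--       for j in range(n):
--           number += (arr[i][j] << j)
--       if number not in s:
--           s.add(number)
--       else:
--           ans.append(i)
--   return ans
-- ===== SOURCE B (Python) =====
-- def repeatedRows(arr, m, n):
--     # Sort-based duplicate detection: sort the (index, packed-key) pairs by
--     # (key, index), detect duplicate keys by comparing neighbours in the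
--     # sorted order (each non-first member of an equal-key run is a duplicate
--     # row), then sort the collected indices back into ascending order.
--     keys = [sum(arr[i][j] << j for j in range(n)) for i in range(m)]
--     pairs = sorted(enumerate(keys), key=lambda p: (p[1], p[0]))
--     dup = [q[0] for p, q in zip(pairs, pairs[1:]) if p[1] == q[1]]
--     return sorted(dup)
-- ===== Notes on version B (the rewrite author's own statement) =====
-- stated objective: alternative
-- what changed: A's single hash-set pass is replaced by a sort-based algorithm: sort the (index, packed-key) pairs by (key, index), collect the index of every pair whose neighbour in sorted order has the same key (non-first member of an equal-key run), and sort those indices ascending.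
import Mathlib
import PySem

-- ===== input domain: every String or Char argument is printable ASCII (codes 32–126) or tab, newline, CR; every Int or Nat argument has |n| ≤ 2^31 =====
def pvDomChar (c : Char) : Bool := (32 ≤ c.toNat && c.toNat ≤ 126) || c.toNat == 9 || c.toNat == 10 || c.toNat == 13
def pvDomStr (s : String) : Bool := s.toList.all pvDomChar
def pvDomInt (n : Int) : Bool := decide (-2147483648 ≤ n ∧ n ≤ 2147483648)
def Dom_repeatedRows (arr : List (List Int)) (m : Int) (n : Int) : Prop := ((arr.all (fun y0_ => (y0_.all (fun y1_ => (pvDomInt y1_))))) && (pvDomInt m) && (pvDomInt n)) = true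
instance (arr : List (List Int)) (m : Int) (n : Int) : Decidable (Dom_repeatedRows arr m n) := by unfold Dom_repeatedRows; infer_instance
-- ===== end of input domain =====

-- B replaces A's single hash-set pass by a sort-based algorithm: sort the (index, packed-key)
-- pairs by (key, index), collect the index of every pair whose sorted-order neighbour has the
-- same key, and sort those indices ascending (objective: alternative).

-- ===== PORT A =====
def repeatedRows (arr : List (List Int)) (m : Int) (n : Int) : List Int :=
  ((PySem.List.pyRange 0 m 1).foldl
    (fun (st : PySem.Set Int × List Int) i =>
      let number : Int :=
        (PySem.List.pyRange 0 n 1).foldl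
          (fun number j => number + (PySem.List.pyGetD (PySem.List.pyGetD arr i []) j 0) <<< j.toNat) 0
      if PySem.Set.contains st.1 number = false then (PySem.Set.add st.1 number, st.2)
      else (st.1, st.2 ++ [i]))
    (PySem.Set.empty, [])).2

-- ===== PORT B =====
def repeatedRows_alt (arr : List (List Int)) (m : Int) (n : Int) : List Int :=
  let keys : List Int := (PySem.List.pyRange 0 m 1).map (fun i =>
    ((PySem.List.pyRange 0 n 1).map
      (fun j => (PySem.List.pyGetD (PySem.List.pyGetD arr i []) j 0) <<< j.toNat)).sum)
  let pairs : List (Int × Int) :=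
    PySem.List.sorted2 (PySem.List.enumerate keys 0) (fun p => p.2) (fun p => p.1)
  let dup : List Int :=
    ((pairs.zip pairs.tail).filter (fun pq => pq.1.2 == pq.2.2)).map (fun pq => pq.2.1)
  PySem.List.sorted dup (fun x => x)

-- ===== PRECONDITION & SPEC =====
-- Pre_ excludes exactly the inputs where Python A raises IndexError: when n ≥ 1 the loop
-- indexes arr[i] for every i < m and arr[i][j] for every j < n.
def Pre_repeatedRows (arr : List (List Int)) (m : Int) (n : Int) : Prop :=
  n ≤ 0 ∨ (m ≤ (arr.length : Int) ∧ ∀ row ∈ arr.take m.toNat, n ≤ (row.length : Int))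
instance (arr : List (List Int)) (m : Int) (n : Int) : Decidable (Pre_repeatedRows arr m n) := by
  unfold Pre_repeatedRows; infer_instance
def pvWitness_repeatedRows : List (List Int) × Int × Int := ([[1, 0], [1, 0], [0, 1]], 3, 2)

def Spec_repeatedRows (arr : List (List Int)) (m : Int) (n : Int) (out : List Int) : Prop := out = repeatedRows_alt arr m n
instance (arr : List (List Int)) (m : Int) (n : Int) (out : List Int) : Decidable (Spec_repeatedRows arr m n out) := by unfold Spec_repeatedRows; infer_instance

-- ===== CLAIM (what is proved, stated in full; the proofs are below) =====
def Claim_equal_repeatedRows : Prop := ∀ (arr : List (List Int)) (m : Int) (n : Int), Dom_repeatedRows arr m n → Pre_repeatedRows arr m n → Spec_repeatedRows arr m n (repeatedRows arr m n)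

-- ===== LEMMAS AND PROOFS =====

-- the packed key of row i, as both ports compute it
def pvKey (arr : List (List Int)) (n : Int) (i : Int) : Int :=
  ((PySem.List.pyRange 0 n 1).map
    (fun j => (PySem.List.pyGetD (PySem.List.pyGetD arr i []) j 0) <<< j.toNat)).sum

-- the common middle form both ports are reduced to
def pvMid (arr : List (List Int)) (n : Int) (k : ℕ) : List Int :=
  (PySem.List.pyRange 0 (k : Int) 1).filter
    (fun i => ((PySem.List.pyRange 0 i 1).map (pvKey arr n)).contains (pvKey arr n i))

-- the scalar lexicographic key corresponding to B's Python tuple key (p[1], p[0])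
def pvLexKey (p : Int × Int) : Lex (Int × Int) := toLex (p.2, p.1)

lemma pv_foldl_add_eq_sum (f : Int → Int) (L : List Int) (c : Int) :
    L.foldl (fun a j => a + f j) c = c + (L.map f).sum := by
  induction L generalizing c with
  | nil => simp
  | cons x xs ih => simp [List.foldl_cons, ih]; ring

lemma pv_contains_ofList (l : List Int) (x : Int) :
    PySem.Set.contains (PySem.Set.ofList l) x = l.contains x := by
  rw [Bool.eq_iff_iff]
  simp [PySem.Set.mem_ofList]

lemma pv_loopA (arr : List (List Int)) (n : Int) (k : ℕ) :
    ((PySem.List.pyRange 0 (k : Int) 1).foldl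
      (fun (st : PySem.Set Int × List Int) i =>
        let number : Int :=
          (PySem.List.pyRange 0 n 1).foldl
            (fun number j => number + (PySem.List.pyGetD (PySem.List.pyGetD arr i []) j 0) <<< j.toNat) 0
        if PySem.Set.contains st.1 number = false then (PySem.Set.add st.1 number, st.2)
        else (st.1, st.2 ++ [i]))
      (PySem.Set.empty, [])) =
    (PySem.Set.ofList ((PySem.List.pyRange 0 (k : Int) 1).map (pvKey arr n)), pvMid arr n k) := by
  unfold pvMid
  induction k with
  | zero => simp [PySem.List.pyRange_one_eq_nil, PySem.Set.ofList, PySem.Set.empty]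
  | succ k ih =>
      have hsplit : PySem.List.pyRange 0 ((k : Int) + 1) 1 =
          PySem.List.pyRange 0 (k : Int) 1 ++ [(k : Int)] :=
        PySem.List.pyRange_one_succ_right (by exact_mod_cast Nat.zero_le k)
      push_cast
      rw [hsplit, List.foldl_append, ih, List.filter_append, List.map_append]
      have hnum : ∀ i : Int,
          ((PySem.List.pyRange 0 n 1).foldl
            (fun number j => number + (PySem.List.pyGetD (PySem.List.pyGetD arr i []) j 0) <<< j.toNat) 0)
          = pvKey arr n i := by
        intro i
        rw [pv_foldl_add_eq_sum]
        simp [pvKey]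
      simp only [List.foldl_cons, List.foldl_nil, hnum, List.filter_cons, List.filter_nil,
        List.map_cons, List.map_nil]
      rw [pv_contains_ofList, PySem.Set.ofList_append_singleton]
      by_cases c :
          (((PySem.List.pyRange 0 (k : Int) 1).map (pvKey arr n)).contains (pvKey arr n (k : Int))) = true
      · have hc : pvKey arr n (k : Int) ∈ (PySem.List.pyRange 0 (k : Int) 1).map (pvKey arr n) :=
          List.mem_of_elem_eq_true c
        have hc' : pvKey arr n (k : Int) ∈ PySem.Set.ofList ((PySem.List.pyRange 0 (k : Int) 1).map (pvKey arr n)) :=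
          (PySem.Set.mem_ofList _ _).2 hc
        rw [if_neg (by rw [c]; simp), if_pos c, PySem.Set.add_of_mem hc']
      · rw [if_pos (by simpa using c), if_neg c]
        simp

lemma pv_sorted2_eq_sorted_lex (xs : List (Int × Int)) :
    PySem.List.sorted2 xs (fun p => p.2) (fun p => p.1)
      = PySem.List.sorted xs pvLexKey := by
  have hbe : (fun (a b : Int × Int) => decide (a.2 < b.2) || (!decide (b.2 < a.2) && decide (a.1 < b.1)))
      = (fun (a b : Int × Int) => decide (pvLexKey a < pvLexKey b)) := by
    funext a b
    have hiff : (pvLexKey a < pvLexKey b) ↔ (a.2 < b.2 ∨ (a.2 = b.2 ∧ a.1 < b.1)) := by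
      simp [pvLexKey, Prod.Lex.lt_iff]
    rcases lt_trichotomy a.2 b.2 with h | h | h
    · simp [h, hiff, not_lt.mpr (le_of_lt h)]
    · simp [h, hiff]
    · simp [hiff, not_lt.mpr (le_of_lt h), h]
      omega
  show List.foldl (fun acc x => PySem.List.insertBy
      (fun a b => decide (a.2 < b.2) || (!decide (b.2 < a.2) && decide (a.1 < b.1))) x acc) [] xs
    = List.foldl (fun acc x => PySem.List.insertBy
      (fun a b => decide (pvLexKey a < pvLexKey b)) x acc) [] xs
  rw [hbe]

lemma pv_mem_adj (P : List (Int × Int)) (x : Int) :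
    (x ∈ ((P.zip P.tail).filter (fun pq => pq.1.2 == pq.2.2)).map (fun pq => pq.2.1)) ↔
    ∃ t : ℕ, ∃ ht : t + 1 < P.length,
      (P[t]'(by omega)).2 = (P[t+1]'ht).2 ∧ (P[t+1]'ht).1 = x := by
  rw [List.mem_map]
  constructor
  · rintro ⟨pq, hmem, hfx⟩
    rw [List.mem_filter] at hmem
    obtain ⟨hz, hcond⟩ := hmem
    obtain ⟨t, htl, hget⟩ := List.mem_iff_getElem.1 hz
    have htlen : t + 1 < P.length := by
      have := htl; simp [List.length_zip, List.length_tail] at this; omega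
    refine ⟨t, htlen, ?_, ?_⟩
    · have : pq = (P[t]'(by omega), P[t+1]'htlen) := by
        rw [← hget, List.getElem_zip]
        congr 1
        exact List.getElem_tail _
      rw [this] at hcond
      simpa using hcond
    · have : pq = (P[t]'(by omega), P[t+1]'htlen) := by
        rw [← hget, List.getElem_zip]
        congr 1
        exact List.getElem_tail _
      rw [this] at hfx
      simpa using hfx
  · rintro ⟨t, ht, heq, hx⟩
    refine ⟨(P[t]'(by omega), P[t+1]'ht), ?_, by simpa using hx⟩
    rw [List.mem_filter]
    constructor
    · apply List.mem_iff_getElem.2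
      refine ⟨t, by simp [List.length_zip, List.length_tail]; omega, ?_⟩
      rw [List.getElem_zip]
      congr 1
      exact List.getElem_tail _
    · simpa using heq

lemma pv_nodup_dup (P : List (Int × Int)) (hfst : (P.map Prod.fst).Nodup) :
    (((P.zip P.tail).filter (fun pq => pq.1.2 == pq.2.2)).map (fun pq => pq.2.1)).Nodup := by
  have h1 : ((P.zip P.tail).filter (fun pq => pq.1.2 == pq.2.2)).Sublist (P.zip P.tail) :=
    List.filter_sublist
  have h2 : (((P.zip P.tail).filter (fun pq => pq.1.2 == pq.2.2)).map (fun pq => pq.2.1)).Sublist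
      ((P.zip P.tail).map (fun pq => pq.2.1)) := h1.map _
  have h3 : (P.zip P.tail).map (fun (pq : (Int × Int) × (Int × Int)) => pq.2.1)
      = (P.tail).map Prod.fst := by
    have hsnd : (P.zip P.tail).map Prod.snd = P.tail :=
      List.map_snd_zip (by simp [List.length_tail])
    calc (P.zip P.tail).map (fun pq => pq.2.1)
        = ((P.zip P.tail).map Prod.snd).map Prod.fst := by rw [List.map_map]; rfl
      _ = (P.tail).map Prod.fst := by rw [hsnd]
  have h4 : ((P.tail).map Prod.fst).Nodup := by
    rw [List.map_tail]
    exact hfst.tail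
  exact (h3 ▸ h2).nodup h4

lemma pv_mem_midg (g : Int → Int) (k : ℕ) (x : Int) :
    x ∈ (PySem.List.pyRange 0 (k : Int) 1).filter
        (fun i => ((PySem.List.pyRange 0 i 1).map g).contains (g i)) ↔
      (0 ≤ x ∧ x < (k : Int) ∧ ∃ j : Int, 0 ≤ j ∧ j < x ∧ g j = g x) := by
  simp only [List.mem_filter, PySem.List.mem_pyRange_one, List.contains_iff_mem, List.mem_map]
  tauto

lemma pv_lex_lt_iff (a b : Int × Int) :
    pvLexKey a < pvLexKey b ↔ (a.2 < b.2 ∨ (a.2 = b.2 ∧ a.1 < b.1)) := by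
  simp [pvLexKey, Prod.Lex.lt_iff]

lemma pv_mem_dup_iff (g : Int → Int) (k : ℕ) (P : List (Int × Int))
    (hperm : P.Perm ((PySem.List.pyRange 0 (k : Int) 1).map (fun i => (i, g i))))
    (hlt : P.Pairwise (fun a b => pvLexKey a < pvLexKey b)) (x : Int) :
    (x ∈ ((P.zip P.tail).filter (fun pq => pq.1.2 == pq.2.2)).map (fun pq => pq.2.1)) ↔
    (0 ≤ x ∧ x < (k : Int) ∧ ∃ j : Int, 0 ≤ j ∧ j < x ∧ g j = g x) := by
  have hmemP : ∀ p : Int × Int, p ∈ P ↔ (0 ≤ p.1 ∧ p.1 < (k : Int) ∧ p.2 = g p.1) := by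
    intro p
    rw [hperm.mem_iff, List.mem_map]
    constructor
    · rintro ⟨i, hi, rfl⟩
      rw [PySem.List.mem_pyRange_one] at hi
      exact ⟨hi.1, hi.2, rfl⟩
    · rintro ⟨h0, hk, hsnd⟩
      exact ⟨p.1, PySem.List.mem_pyRange_one.2 ⟨h0, hk⟩, by rw [← hsnd]⟩
  have hg := List.pairwise_iff_getElem.1 hlt
  rw [pv_mem_adj]
  constructor
  · rintro ⟨t, ht, heq, hx⟩
    have hq := (hmemP (P[t+1]'ht)).1 (List.getElem_mem ht)
    have hp := (hmemP (P[t]'(by omega))).1 (List.getElem_mem (by omega))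
    have hlex := hg t (t+1) (by omega) ht (by omega)
    rw [pv_lex_lt_iff] at hlex
    subst hx
    refine ⟨hq.1, hq.2.1, (P[t]'(by omega)).1, hp.1, ?_, ?_⟩
    · rcases hlex with h | h
      · omega
      · exact h.2
    · rw [← hp.2.2, ← hq.2.2]
      exact heq
  · rintro ⟨hx0, hxk, j, hj0, hjx, hkey⟩
    have hxP : (x, g x) ∈ P := (hmemP (x, g x)).2 ⟨hx0, hxk, rfl⟩
    have hjP : (j, g j) ∈ P := (hmemP (j, g j)).2 ⟨hj0, by omega, rfl⟩
    obtain ⟨t, htl, hgt⟩ := List.mem_iff_getElem.1 hxP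
    obtain ⟨s, hsl, hgs⟩ := List.mem_iff_getElem.1 hjP
    have hst : s < t := by
      rcases lt_trichotomy s t with h | h | h
      · exact h
      · exfalso
        simp only [h] at hgs
        rw [hgt] at hgs
        have := congrArg Prod.fst hgs
        simp at this
        omega
      · exfalso
        have := hg t s htl hsl h
        rw [hgt, hgs, pv_lex_lt_iff] at this
        simp at this
        omega
    obtain ⟨u, rfl⟩ : ∃ u, t = u + 1 := ⟨t - 1, by omega⟩
    have hsnd1 : (P[s]'hsl).2 ≤ (P[u]'(by omega)).2 := by
      rcases Nat.lt_or_ge s u with h | h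
      · have := hg s u hsl (by omega) h
        rw [pv_lex_lt_iff] at this
        omega
      · have : s = u := by omega
        subst this
        exact le_refl _
    have huu := hg u (u+1) (by omega) htl (by omega)
    rw [pv_lex_lt_iff] at huu
    have h1 : (P[s]'hsl).2 = g j := by rw [hgs]
    have h2 : (P[u+1]'htl).2 = g x := by rw [hgt]
    have heq2 : (P[u]'(by omega)).2 = (P[u+1]'htl).2 := by omega
    exact ⟨u, htl, heq2, by rw [hgt]⟩

lemma pv_B_of_keys (g : Int → Int) (k : ℕ) :
    PySem.List.sorted
      ((((PySem.List.sorted2 (PySem.List.enumerate ((PySem.List.pyRange 0 (k : Int) 1).map g) 0) (fun p => p.2) (fun p => p.1)).zip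
          (PySem.List.sorted2 (PySem.List.enumerate ((PySem.List.pyRange 0 (k : Int) 1).map g) 0) (fun p => p.2) (fun p => p.1)).tail).filter
         (fun pq => pq.1.2 == pq.2.2)).map (fun pq => pq.2.1)) (fun x => x)
    = (PySem.List.pyRange 0 (k : Int) 1).filter (fun i => ((PySem.List.pyRange 0 i 1).map g).contains (g i)) := by
  rw [pv_sorted2_eq_sorted_lex]
  have hE : PySem.List.enumerate ((PySem.List.pyRange 0 (k : Int) 1).map g) 0
      = (PySem.List.pyRange 0 (k : Int) 1).map (fun i => (i, g i)) := by
    rw [PySem.List.enumerate_eq_map_pyRange _ (0 : Int)]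
    have hlen : PySem.List.len ((PySem.List.pyRange 0 (k : Int) 1).map g) = (k : Int) := by
      simp [PySem.List.len_eq, PySem.List.length_pyRange_one]
    rw [hlen]
    apply List.map_congr_left
    intro j hj
    rw [PySem.List.mem_pyRange_one] at hj
    rw [PySem.List.pyGetD_map_pyRange_of_nonneg g (k : Int) j 0 hj.1 hj.2]
  set E := PySem.List.enumerate ((PySem.List.pyRange 0 (k : Int) 1).map g) 0 with hEdef
  set P := PySem.List.sorted E pvLexKey with hPdef
  have hperm0 : P.Perm E := PySem.List.sorted_perm E pvLexKey false
  have hperm : P.Perm ((PySem.List.pyRange 0 (k : Int) 1).map (fun i => (i, g i))) := hE ▸ hperm0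
  have hinjF : Function.Injective (fun i : Int => (i, g i)) := fun a b h => congrArg Prod.fst h
  have hnodupE : E.Nodup := by
    rw [hE]
    exact List.Nodup.map hinjF (PySem.List.nodup_pyRange_one 0 (k : Int))
  have hnodupP : P.Nodup := hperm0.nodup_iff.2 hnodupE
  have hinjLex : Function.Injective pvLexKey := by
    intro p q h
    have := congrArg ofLex h
    simp only [pvLexKey, ofLex_toLex, Prod.mk.injEq] at this
    exact Prod.ext this.2 this.1
  have hle : P.Pairwise (fun a b => pvLexKey a ≤ pvLexKey b) := PySem.List.sorted_pairwise E pvLexKey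
  have hlt : P.Pairwise (fun a b => pvLexKey a < pvLexKey b) := by
    have hne : P.Pairwise (fun a b => a ≠ b) := hnodupP
    exact (hle.and hne).imp (fun h => lt_of_le_of_ne h.1 (fun hk => h.2 (hinjLex hk)))
  have hfst : (P.map Prod.fst).Nodup := by
    have hp : (P.map Prod.fst).Perm (((PySem.List.pyRange 0 (k : Int) 1).map (fun i => (i, g i))).map Prod.fst) :=
      hperm.map Prod.fst
    apply hp.nodup_iff.2
    rw [List.map_map]
    have : (Prod.fst ∘ fun i : Int => (i, g i)) = id := rfl
    rw [this, List.map_id]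
    exact PySem.List.nodup_pyRange_one 0 (k : Int)
  have hmidnodup : ((PySem.List.pyRange 0 (k : Int) 1).filter
      (fun i => ((PySem.List.pyRange 0 i 1).map g).contains (g i))).Nodup :=
    ((PySem.List.pairwise_lt_pyRange_one 0 (k : Int)).filter _).imp (fun h => ne_of_lt h)
  have hmidlt : ((PySem.List.pyRange 0 (k : Int) 1).filter
      (fun i => ((PySem.List.pyRange 0 i 1).map g).contains (g i))).Pairwise (· < ·) :=
    (PySem.List.pairwise_lt_pyRange_one 0 (k : Int)).filter _
  have hpermdup : ((PySem.List.pyRange 0 (k : Int) 1).filter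
      (fun i => ((PySem.List.pyRange 0 i 1).map g).contains (g i))).Perm
      (((P.zip P.tail).filter (fun pq => pq.1.2 == pq.2.2)).map (fun pq => pq.2.1)) := by
    rw [List.perm_ext_iff_of_nodup hmidnodup (pv_nodup_dup P hfst)]
    intro a
    rw [pv_mem_midg g k a, pv_mem_dup_iff g k P hperm hlt a]
  exact PySem.List.sorted_eq_of_perm_of_pairwise_lt _ _ _ hpermdup hmidlt

lemma pv_loopB (arr : List (List Int)) (n : Int) (k : ℕ) :
    repeatedRows_alt arr (k : Int) n = pvMid arr n k := by
  unfold repeatedRows_alt pvMid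
  exact pv_B_of_keys (pvKey arr n) k

-- ===== VERDICT (by name: the statement is the Claim_ definition above) =====
theorem repeatedRows_spec : Claim_equal_repeatedRows := by
  intro arr m n _ _
  unfold Spec_repeatedRows
  by_cases hm : 0 ≤ m
  · obtain ⟨k, hk⟩ := Int.eq_ofNat_of_zero_le hm
    subst hk
    rw [pv_loopB arr n k]
    unfold repeatedRows
    rw [pv_loopA arr n k]
  · have h0 : PySem.List.pyRange 0 m 1 = [] := PySem.List.pyRange_one_eq_nil (by omega)
    unfold repeatedRows repeatedRows_alt
    simp [h0, PySem.List.enumerate_nil, PySem.List.sorted2, PySem.List.sorted]
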